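-- pv_equiv track=rewrite | github.com/lilyb01/comic_git | src/scripts/build_site.py | get_storylines
-- ===== SOURCE A (Python) =====
-- from collections import OrderedDict, defaultdict
-- from typing import Dict, List, Tuple, Any, Union
--
-- def get_storylines(comic_data_dicts: List[Dict], show_uncategorized: bool) -> OrderedDict:
--     # Start with an OrderedDict, so we can easily drop the pages we encounter in the proper buckets, while keeping
--     # their proper order
--     storylines_dict = OrderedDict()
--     for comic_data in comic_data_dicts:
--         storyline = comic_data["storyline"]
--         if not storyline:
--             if not show_uncategorized:
--                 continue
--             storyline = "Uncategorized"
--         if storyline not in storylines_dict.keys():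
--             storylines_dict[storyline] = []
--         storylines_dict[storyline].append(comic_data.copy())
--     if "Uncategorized" in storylines_dict:
--         storylines_dict.move_to_end("Uncategorized")
--     return storylines_dict
-- ===== SOURCE B (Python) =====
-- from collections import OrderedDict
--
-- def get_storylines(comic_data_dicts, show_uncategorized):
--     # one pass to normalize & keep pages, then group by first-appearance keys
--     entries = [(page["storyline"] or "Uncategorized", page)
--                for page in comic_data_dicts
--                if page["storyline"] or show_uncategorized]
--     keys = list(dict.fromkeys(k for k, _ in entries))
--     if "Uncategorized" in keys:
--         keys = [k for k in keys if k != "Uncategorized"] + ["Uncategorized"]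
--     return OrderedDict((key, [p.copy() for k, p in entries if k == key])
--                        for key in keys)
-- ===== Notes on version B (the rewrite author's own statement) =====
-- stated objective: alternative
-- what changed: A builds the grouping in one streaming pass that creates/extends dict buckets per page and then move_to_ends 'Uncategorized'; B instead makes three separate passes: a normalized (storyline, page) entry list, the first-appearance-ordered unique key list with 'Uncategorized' moved to the end, then each bucket built by a per-key scan of the entries.
import Mathlib
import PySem

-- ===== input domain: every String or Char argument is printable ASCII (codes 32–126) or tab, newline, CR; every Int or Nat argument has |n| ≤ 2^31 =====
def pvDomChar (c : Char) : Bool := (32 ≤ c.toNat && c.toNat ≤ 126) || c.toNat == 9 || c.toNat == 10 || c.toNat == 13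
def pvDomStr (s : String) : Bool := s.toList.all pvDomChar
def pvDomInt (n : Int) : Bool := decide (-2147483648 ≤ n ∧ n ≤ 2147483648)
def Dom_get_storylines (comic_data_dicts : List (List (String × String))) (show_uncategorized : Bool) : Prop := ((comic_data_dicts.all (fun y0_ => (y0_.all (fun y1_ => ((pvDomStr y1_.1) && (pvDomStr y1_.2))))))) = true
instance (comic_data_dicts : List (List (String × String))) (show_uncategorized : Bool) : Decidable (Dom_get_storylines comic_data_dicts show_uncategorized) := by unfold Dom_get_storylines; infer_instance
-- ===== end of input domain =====

-- B groups in three separate passes (normalized entry list, first-appearance key list with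
-- 'Uncategorized' moved to the end, then a per-key scan) instead of A's single streaming
-- dict-building loop; objective: alternative decomposition, same results.

-- comic_data["storyline"]: first-match lookup (Pre_ guarantees the key is present)
def pvKey (p : List (String × String)) : String := (PySem.Dict.mk p).getD "storyline" ""

-- ===== PORT A =====
def get_storylines (comic_data_dicts : List (List (String × String))) (show_uncategorized : Bool) : List (String × List (List (String × String))) :=
  let d := comic_data_dicts.foldl (fun (d : PySem.Dict String (List (List (String × String)))) comic_data =>
    let storyline := pvKey comic_data
    if storyline = "" ∧ show_uncategorized = false then d
    else
      let s := if storyline = "" then "Uncategorized" else storyline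
      let d1 := if d.contains s then d else d.insert s []
      d1.modify s [] (fun l => l ++ [comic_data])) PySem.Dict.empty
  -- move_to_end ported by hand: the dict's keys are unique, so removing the one entry
  -- with key "Uncategorized" and appending it at the end is exact
  match d.get? "Uncategorized" with
  | some v => (d.items.filter (fun p => !(p.1 == "Uncategorized"))) ++ [("Uncategorized", v)]
  | none => d.items

-- ===== PORT B =====
def get_storylines_alt (comic_data_dicts : List (List (String × String))) (show_uncategorized : Bool) : List (String × List (List (String × String))) :=
  let entries := (comic_data_dicts.filter (fun p => !(pvKey p == "") || show_uncategorized)).map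
      (fun p => ((if pvKey p = "" then "Uncategorized" else pvKey p), p))
  let keys0 := PySem.Set.ofList (entries.map (·.1))
  let keys := if "Uncategorized" ∈ keys0
              then keys0.filter (fun k => !(k == "Uncategorized")) ++ ["Uncategorized"]
              else keys0
  keys.map (fun key => (key, (entries.filter (fun e => e.1 == key)).map (·.2)))

-- ===== PRECONDITION & SPEC =====
-- Pre_ excludes exactly the inputs where some page has no "storyline" key: there Python A raises KeyError.
def Pre_get_storylines (comic_data_dicts : List (List (String × String))) (show_uncategorized : Bool) : Prop :=
  (comic_data_dicts.all (fun p => (PySem.Dict.mk p).contains "storyline")) = true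
instance (comic_data_dicts : List (List (String × String))) (show_uncategorized : Bool) : Decidable (Pre_get_storylines comic_data_dicts show_uncategorized) := by unfold Pre_get_storylines; infer_instance
def pvWitness_get_storylines : (List (List (String × String))) × Bool := ([[("storyline", "a")], [("storyline", "")]], true)

def Spec_get_storylines (comic_data_dicts : List (List (String × String))) (show_uncategorized : Bool) (out : List (String × List (List (String × String)))) : Prop := out = get_storylines_alt comic_data_dicts show_uncategorized
instance (comic_data_dicts : List (List (String × String))) (show_uncategorized : Bool) (out : List (String × List (List (String × String)))) : Decidable (Spec_get_storylines comic_data_dicts show_uncategorized out) := by unfold Spec_get_storylines; infer_instance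

-- ===== CLAIM (what is proved, stated in full; the proofs are below) =====
def Claim_equal_get_storylines : Prop := ∀ (comic_data_dicts : List (List (String × String))) (show_uncategorized : Bool), Dom_get_storylines comic_data_dicts show_uncategorized → Pre_get_storylines comic_data_dicts show_uncategorized → Spec_get_storylines comic_data_dicts show_uncategorized (get_storylines comic_data_dicts show_uncategorized)

-- ===== LEMMAS AND PROOFS =====

-- the normalized (key, page) entry list both programs effectively process
def pvEntries (comic_data_dicts : List (List (String × String))) (show_uncategorized : Bool) : List (String × List (String × String)) :=
  (comic_data_dicts.filter (fun p => !(pvKey p == "") || show_uncategorized)).map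
      (fun p => ((if pvKey p = "" then "Uncategorized" else pvKey p), p))

-- "insert-empty-if-absent then append" is exactly Dict.modify with default []
theorem pv_step_eq_modify (d : PySem.Dict String (List (List (String × String)))) (k : String)
    (f : List (List (String × String)) → List (List (String × String))) :
    (if d.contains k then d else d.insert k []).modify k [] f = d.modify k [] f := by
  by_cases h : d.contains k
  · simp [h]
  · have hc : d.contains k = false := by simpa using h
    rw [if_neg h]
    simp only [PySem.Dict.modify]
    rw [PySem.Dict.getD_insert_self, PySem.Dict.insert_insert_self,
        PySem.Dict.getD_of_not_contains d _ hc]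

-- A's loop over the raw pages is the grouping fold over the normalized entries
theorem pv_fuse (comic_data_dicts : List (List (String × String))) (show_uncategorized : Bool)
    (d : PySem.Dict String (List (List (String × String)))) :
    comic_data_dicts.foldl (fun d comic_data =>
      let storyline := pvKey comic_data
      if storyline = "" ∧ show_uncategorized = false then d
      else
        let s := if storyline = "" then "Uncategorized" else storyline
        let d1 := if d.contains s then d else d.insert s []
        d1.modify s [] (fun l => l ++ [comic_data])) d
    = (pvEntries comic_data_dicts show_uncategorized).foldl
        (fun d p => d.modify p.1 [] (fun l => l ++ [p.2])) d := by
  induction comic_data_dicts generalizing d with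
  | nil => rfl
  | cons p rest ih =>
    simp only [List.foldl_cons]
    by_cases h : pvKey p = ""
    · cases su : show_uncategorized with
      | false =>
        simp [pvEntries, h, su, pv_step_eq_modify] at ih ⊢
        try exact ih d
        try simp [ih]
      | true =>
        simp [pvEntries, h, su, pv_step_eq_modify] at ih ⊢
        try exact ih _
        try simp [ih]
    · simp [pvEntries, h, pv_step_eq_modify] at ih ⊢
      try exact ih _
      try simp [ih, h]

-- the grouping fold's keys are the first-appearance-ordered distinct entry keys
theorem pv_dict_keys (es : List (String × List (String × String))) :
    (es.foldl (fun (d : PySem.Dict String (List (List (String × String)))) p =>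
        d.modify p.1 [] (fun l => l ++ [p.2])) PySem.Dict.empty).keys
    = PySem.Set.ofList (es.map (·.1)) := by
  have := PySem.Dict.keys_foldl_modify_key es (fun p => p.1) ([] : List (List (String × String)))
    (fun _ p => fun l => l ++ [p.2]) PySem.Dict.empty
  simpa [PySem.Set.update_empty] using this

-- characterisation of the grouping fold's dict: its items are B's per-key groups over the
-- first-appearance key list
theorem pv_dict_items (es : List (String × List (String × String))) :
    (es.foldl (fun (d : PySem.Dict String (List (List (String × String)))) p =>
        d.modify p.1 [] (fun l => l ++ [p.2])) PySem.Dict.empty).items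
    = (PySem.Set.ofList (es.map (·.1))).map
        (fun k => (k, (es.filter (fun e => e.1 == k)).map (·.2))) := by
  have hnd : (es.foldl (fun (d : PySem.Dict String (List (List (String × String)))) p =>
      d.modify p.1 [] (fun l => l ++ [p.2])) PySem.Dict.empty).keys.Nodup :=
    PySem.Dict.nodup_keys_foldl_modify_key es (fun p => p.1) _
      (fun _ p => fun l => l ++ [p.2]) PySem.Dict.empty (by simp)
  rw [PySem.Dict.items_eq_map_keys _ hnd ([] : List (List (String × String))), pv_dict_keys]
  refine List.map_congr_left (fun k _ => ?_)
  rw [PySem.Dict.getD_foldl_modify_append]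
  simp

-- A's tail (dict + move_to_end, as items) equals B's tail, for any entry list
theorem pv_main (es : List (String × List (String × String))) :
    (match (es.foldl (fun (d : PySem.Dict String (List (List (String × String)))) p =>
        d.modify p.1 [] (fun l => l ++ [p.2])) PySem.Dict.empty).get? "Uncategorized" with
     | some v => ((es.foldl (fun (d : PySem.Dict String (List (List (String × String)))) p =>
          d.modify p.1 [] (fun l => l ++ [p.2])) PySem.Dict.empty).items.filter
            (fun p => !(p.1 == "Uncategorized"))) ++ [("Uncategorized", v)]
     | none => (es.foldl (fun (d : PySem.Dict String (List (List (String × String)))) p =>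
          d.modify p.1 [] (fun l => l ++ [p.2])) PySem.Dict.empty).items)
    = (if "Uncategorized" ∈ PySem.Set.ofList (es.map (·.1))
       then (PySem.Set.ofList (es.map (·.1))).filter (fun k => !(k == "Uncategorized")) ++ ["Uncategorized"]
       else PySem.Set.ofList (es.map (·.1))).map
          (fun key => (key, (es.filter (fun e => e.1 == key)).map (·.2))) := by
  cases hg : (es.foldl (fun (d : PySem.Dict String (List (List (String × String)))) p =>
      d.modify p.1 [] (fun l => l ++ [p.2])) PySem.Dict.empty).get? "Uncategorized" with
  | none =>
    have hmem : "Uncategorized" ∉ PySem.Set.ofList (es.map (·.1)) := by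
      rw [← pv_dict_keys es]
      exact (PySem.Dict.get?_eq_none_iff_not_mem_keys _ _).mp hg
    rw [if_neg hmem, pv_dict_items]
  | some v =>
    have hmem : "Uncategorized" ∈ PySem.Set.ofList (es.map (·.1)) := by
      rw [← pv_dict_keys es]
      by_contra hn
      rw [(PySem.Dict.get?_eq_none_iff_not_mem_keys _ _).mpr hn] at hg
      simp at hg
    have hv : v = (es.filter (fun e => e.1 == "Uncategorized")).map (·.2) := by
      have hin := PySem.Dict.mem_items_of_get?_eq_some _ hg
      rw [pv_dict_items] at hin
      obtain ⟨k, _, hkv⟩ := List.mem_map.mp hin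
      obtain ⟨hk1, hk2⟩ := Prod.mk.injEq .. ▸ hkv
      rw [← hk2, hk1]
    rw [if_pos hmem, pv_dict_items, hv, List.map_append, List.filter_map]
    simp
    exact congrArg _ (List.filter_congr (fun k _ => rfl))

theorem get_storylines_eq_alt (comic_data_dicts : List (List (String × String))) (show_uncategorized : Bool) :
    get_storylines comic_data_dicts show_uncategorized = get_storylines_alt comic_data_dicts show_uncategorized := by
  unfold get_storylines get_storylines_alt
  rw [pv_fuse]
  exact pv_main (pvEntries comic_data_dicts show_uncategorized)

-- ===== VERDICT (by name: the statement is the Claim_ definition above) =====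
theorem get_storylines_spec : Claim_equal_get_storylines := by
  intro cds su _ _
  exact get_storylines_eq_alt cds su
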